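/- GENERATED by c/gen_decode.py: decode facts of the image, one per distinct instruction byte string. -/
import UserX.DecodeImage

#decode_all ProgX.Base.Dec
  "0f8268010000"  -- jb 102aca
  "415f"  -- pop r15
  "4881ffefffff00"  -- cmp rdi,0xffffef
  "4889c5"  -- mov rbp,rax
  "488b47e0"  -- mov rax,QWORD PTR [rdi-0x20]
  "490faffd"  -- imul rdi,r13
  "4c39eb"  -- cmp rbx,r13
  "660f28d1"  -- movapd xmm2,xmm1
  "66480f7efa"  -- movq rdx,xmm7
  "74f0"  -- je 101daa
  "7a0d"  -- jp 102cfd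
  "89f8"  -- mov eax,edi
  "bfff030000"  -- mov edi,0x3ff
  "e886f9ffff"  -- call 101e60
  "e8e7dfffff"  -- call 101520
  "ebc1"  -- jmp 10411f
  "f20f2ad8"  -- cvtsi2sd xmm3,eax
  "f20f59157bda0300"  -- mulsd xmm2,QWORD PTR [rip+0x3da7b]
  "f20f5e152ce00300"  -- divsd xmm2,QWORD PTR [rip+0x3e02c]
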